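-- pv_equiv track=rewrite | github.com/yushan1986/DFL | func.py | counts_from_cum
-- ===== SOURCE A (Python) =====
-- def counts_from_cum(inlist):
--     outlist = []
--     item = 0
--     for i in inlist:
--         freq = i - item
--         outlist.append(freq)
--         item = item + freq
--     return outlist
-- ===== SOURCE B (Python) =====
-- def counts_from_cum(inlist):
--     return [cur - prev for cur, prev in zip(inlist, [0] + inlist[:-1])]
-- ===== Notes on version B (the rewrite author's own statement) =====
-- stated objective: idiomatic
-- what changed: Replaced the stateful accumulator loop with a direct elementwise subtraction of the list from its predecessor-shifted copy ([0] + inlist[:-1]) via zip.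
import Mathlib
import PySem

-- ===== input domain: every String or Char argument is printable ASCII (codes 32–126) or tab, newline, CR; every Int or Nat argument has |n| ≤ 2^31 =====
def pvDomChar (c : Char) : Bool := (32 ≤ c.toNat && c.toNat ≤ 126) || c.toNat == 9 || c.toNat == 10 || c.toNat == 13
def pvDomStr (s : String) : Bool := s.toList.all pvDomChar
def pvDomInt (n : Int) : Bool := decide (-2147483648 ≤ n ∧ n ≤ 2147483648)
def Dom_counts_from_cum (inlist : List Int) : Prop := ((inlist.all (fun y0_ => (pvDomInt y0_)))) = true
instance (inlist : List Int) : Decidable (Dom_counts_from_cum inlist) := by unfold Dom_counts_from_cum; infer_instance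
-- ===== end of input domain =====

-- B replaces A's stateful accumulator loop by an elementwise subtraction of the
-- list from its predecessor-shifted copy (idiomatic, same cost).


-- ===== PORT A =====
-- literal port of A's loop: state = (outlist, item)
def counts_from_cum (inlist : List Int) : List Int :=
  (inlist.foldl (fun (s : List Int × Int) i =>
      let freq := i - s.2
      (s.1 ++ [freq], s.2 + freq)) ([], 0)).1

-- ===== PORT B =====
-- port of Source B: zip inlist with [0] + inlist[:-1] and subtract elementwise
def counts_from_cum_alt (inlist : List Int) : List Int :=
  List.zipWith (fun cur prev => cur - prev) inlist (0 :: inlist.dropLast)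

-- ===== PRECONDITION & SPEC =====
def Spec_counts_from_cum (inlist : List Int) (out : List Int) : Prop := out = counts_from_cum_alt inlist
instance (inlist : List Int) (out : List Int) : Decidable (Spec_counts_from_cum inlist out) := by unfold Spec_counts_from_cum; infer_instance

-- ===== CLAIM (what is proved, stated in full; the proofs are below) =====
def Claim_equal_counts_from_cum : Prop := ∀ (inlist : List Int), Dom_counts_from_cum inlist → Spec_counts_from_cum inlist (counts_from_cum inlist)

-- ===== LEMMAS AND PROOFS =====
-- loop invariant: the accumulated output is acc followed by the pairwise
-- differences of l against (t :: l.dropLast), where t is the current item state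
theorem counts_from_cum_loop (l : List Int) (acc : List Int) (t : Int) :
    (l.foldl (fun (s : List Int × Int) i =>
        let freq := i - s.2
        (s.1 ++ [freq], s.2 + freq)) (acc, t)).1
      = acc ++ List.zipWith (fun cur prev => cur - prev) l (t :: l.dropLast) := by
  induction l generalizing acc t with
  | nil => simp
  | cons i l ih =>
    simp only [List.foldl_cons]
    have h : t + (i - t) = i := by ring
    rw [show (let freq := i - t; (acc ++ [freq], t + freq)) = (acc ++ [i - t], i) by
      simp [h]]
    rw [ih]
    cases l with
    | nil => simp
    | cons x xs => simp

-- ===== VERDICT (by name: the statement is the Claim_ definition above) =====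
theorem counts_from_cum_spec : Claim_equal_counts_from_cum := by
  intro inlist _
  unfold Spec_counts_from_cum counts_from_cum counts_from_cum_alt
  simpa using counts_from_cum_loop inlist [] 0
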